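-- pv_equiv track=rewrite | github.com/Tulpana/ARC-AGI-2 | arc_agi_2_submission/predict_competition.py | snap_border_like
-- ===== SOURCE A (Python) =====
-- def _is_rectangular_grid(grid) -> bool:
--     if not isinstance(grid, list) or not grid:
--         return False
--     first = grid[0]
--     if not isinstance(first, list):
--         return False
--     width = len(first)
--     if width == 0:
--         return False
--     for row in grid:
--         if not isinstance(row, list) or len(row) != width:
--             return False
--     return True
--
-- def _copy_grid(grid):
--     if not _is_rectangular_grid(grid):
--         return grid
--     return [list(row) for row in grid]
--
-- def snap_border_like(train_out, pred):
--     if not (_is_rectangular_grid(pred) and _is_rectangular_grid(train_out)):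
--         return pred
--
--     height, width = len(pred), len(pred[0])
--     if len(train_out) != height or len(train_out[0]) != width:
--         return pred
--
--     snapped = _copy_grid(pred)
--     for c in range(width):
--         snapped[0][c] = train_out[0][c]
--         snapped[height - 1][c] = train_out[height - 1][c]
--     for r in range(height):
--         snapped[r][0] = train_out[r][0]
--         snapped[r][width - 1] = train_out[r][width - 1]
--     return snapped
-- ===== SOURCE B (Python) =====
-- def _is_rectangular_grid(grid) -> bool:
--     if not isinstance(grid, list) or not grid:
--         return False
--     first = grid[0]
--     if not isinstance(first, list):
--         return False
--     width = len(first)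
--     if width == 0:
--         return False
--     for row in grid:
--         if not isinstance(row, list) or len(row) != width:
--             return False
--     return True
--
-- def snap_border_like(train_out, pred):
--     if not (_is_rectangular_grid(pred) and _is_rectangular_grid(train_out)):
--         return pred
--
--     height, width = len(pred), len(pred[0])
--     if len(train_out) != height or len(train_out[0]) != width:
--         return pred
--
--     return [[train_out[r][c]
--              if r == 0 or r == height - 1 or c == 0 or c == width - 1
--              else pred[r][c]
--              for c in range(width)]
--             for r in range(height)]
-- ===== Notes on version B (the rewrite author's own statement) =====
-- stated objective: simpler
-- what changed: Instead of deep-copying pred and then mutating the four border lines in two index loops, B builds the result in a single per-cell pass: one nested comprehension chooses train_out[r][c] on border cells and pred[r][c] elsewhere; the copy helper disappears.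
import Mathlib
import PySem

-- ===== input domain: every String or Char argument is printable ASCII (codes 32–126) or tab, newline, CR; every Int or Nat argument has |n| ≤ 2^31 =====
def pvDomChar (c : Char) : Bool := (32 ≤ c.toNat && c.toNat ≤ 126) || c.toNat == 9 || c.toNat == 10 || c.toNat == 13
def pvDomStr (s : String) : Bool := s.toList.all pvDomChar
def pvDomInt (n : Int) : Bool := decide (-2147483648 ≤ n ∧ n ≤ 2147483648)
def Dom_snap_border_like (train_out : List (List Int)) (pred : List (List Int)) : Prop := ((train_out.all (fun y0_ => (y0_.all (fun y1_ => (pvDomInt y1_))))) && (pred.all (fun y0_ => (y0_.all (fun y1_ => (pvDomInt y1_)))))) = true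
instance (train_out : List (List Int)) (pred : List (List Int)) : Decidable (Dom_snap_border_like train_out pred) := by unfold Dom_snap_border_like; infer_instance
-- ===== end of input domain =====

-- B replaces A's copy-then-patch-border mutation with one per-cell conditional comprehension (simpler decomposition; same cost).

-- ===== PORT A =====
-- loop 'for row in grid: if len(row) != width: return False' ported as List.all (same early-exit semantics)
def pvIsRectangularGrid (grid : List (List Int)) : Bool :=
  match grid with
  | [] => false
  | first :: _ =>
    let width := first.length
    if width = 0 then false
    else grid.all (fun row => row.length = width)

-- 'list(row)' copies a row; under value semantics this is the identity on each row
def pvCopyGrid (grid : List (List Int)) : List (List Int) :=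
  if ¬ pvIsRectangularGrid grid then grid
  else grid.map (fun row => row)

-- 'snapped[i][c] = v' : in-place write to row i, column c (in range wherever A executes it)
def pvSetCell (g : List (List Int)) (i c : Nat) (v : Int) : List (List Int) :=
  g.modify i (fun row => row.set c v)

-- 'grid[i][c]' read, indices in range wherever A executes it
def pvCell (g : List (List Int)) (i c : Nat) : Int :=
  (g.getD i []).getD c 0

def snap_border_like (train_out : List (List Int)) (pred : List (List Int)) : List (List Int) :=
  if ¬ (pvIsRectangularGrid pred && pvIsRectangularGrid train_out) then pred
  else
    let height := pred.length
    let width := (pred.getD 0 []).length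
    if train_out.length ≠ height ∨ (train_out.getD 0 []).length ≠ width then pred
    else
      let snapped := pvCopyGrid pred
      let snapped := (List.range width).foldl (fun s c =>
        let s := pvSetCell s 0 c (pvCell train_out 0 c)
        pvSetCell s (height - 1) c (pvCell train_out (height - 1) c)) snapped
      let snapped := (List.range height).foldl (fun s r =>
        let s := pvSetCell s r 0 (pvCell train_out r 0)
        pvSetCell s r (width - 1) (pvCell train_out r (width - 1))) snapped
      snapped

-- ===== PORT B =====
def snap_border_like_alt (train_out : List (List Int)) (pred : List (List Int)) : List (List Int) :=
  if ¬ (pvIsRectangularGrid pred && pvIsRectangularGrid train_out) then pred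
  else
    let height := pred.length
    let width := (pred.getD 0 []).length
    if train_out.length ≠ height ∨ (train_out.getD 0 []).length ≠ width then pred
    else
      (List.range height).map (fun r =>
        (List.range width).map (fun c =>
          if r = 0 ∨ r = height - 1 ∨ c = 0 ∨ c = width - 1
          then pvCell train_out r c
          else pvCell pred r c))

-- ===== PRECONDITION & SPEC =====
def Spec_snap_border_like (train_out : List (List Int)) (pred : List (List Int)) (out : List (List Int)) : Prop := out = snap_border_like_alt train_out pred
instance (train_out : List (List Int)) (pred : List (List Int)) (out : List (List Int)) : Decidable (Spec_snap_border_like train_out pred out) := by unfold Spec_snap_border_like; infer_instance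

-- ===== CLAIM (what is proved, stated in full; the proofs are below) =====
def Claim_equal_snap_border_like : Prop := ∀ (train_out : List (List Int)) (pred : List (List Int)), Dom_snap_border_like train_out pred → Spec_snap_border_like train_out pred (snap_border_like train_out pred)

-- ===== LEMMAS AND PROOFS =====

-- Facts extracted from the rectangularity guard
theorem pvRect_facts (g : List (List Int)) (h : pvIsRectangularGrid g = true) :
    0 < g.length ∧ 0 < (g.getD 0 []).length ∧
      ∀ r, r < g.length → (g.getD r []).length = (g.getD 0 []).length := by
  cases g with
  | nil => simp [pvIsRectangularGrid] at h
  | cons first rest =>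
    unfold pvIsRectangularGrid at h
    simp only [] at h
    split at h
    · exact absurd h (by simp)
    · rename_i hW
      refine ⟨by simp, by simpa using Nat.pos_of_ne_zero hW, ?_⟩
      intro r hr
      have hmem : (first :: rest)[r] ∈ (first :: rest) := List.getElem_mem hr
      have := List.all_eq_true.mp h _ hmem
      simp only [decide_eq_true_eq] at this
      rw [List.getD_eq_getElem _ _ hr, this]
      simp

-- Length preservation of a single in-place cell write
theorem pvSetCell_length (g : List (List Int)) (i c : Nat) (v : Int) :
    (pvSetCell g i c v).length = g.length := by
  simp [pvSetCell]

theorem pvSetCell_row_length (g : List (List Int)) (i c : Nat) (v : Int) (r : Nat) :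
    ((pvSetCell g i c v).getD r []).length = ((g.getD r []).length) := by
  simp only [pvSetCell, List.getD_eq_getElem?_getD, List.getElem?_modify]
  cases hg : g[r]? with
  | none => simp
  | some row => by_cases hir : i = r <;> simp [hir]

-- Pointwise effect of a single in-range in-place cell write
theorem pvSetCell_cell (g : List (List Int)) (i c : Nat) (v : Int)
    (hi : i < g.length) (hc : c < (g.getD i []).length) (r c' : Nat) :
    pvCell (pvSetCell g i c v) r c' =
      if r = i ∧ c' = c then v else pvCell g r c' := by
  simp only [pvCell, pvSetCell, List.getD_eq_getElem?_getD, List.getElem?_modify]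
  by_cases hir : i = r
  · subst hir
    have hg : g[i]? = some (g[i]'hi) := List.getElem?_eq_getElem hi
    have hrow : g.getD i [] = g[i]'hi := List.getD_eq_getElem _ _ hi
    rw [hg]
    simp only [Option.getD_some]
    rw [hrow] at hc
    by_cases hcc : c' = c
    · subst hcc
      simp [hc]
    · simp [Ne.symm hcc, hcc]
  · have hne : ¬ (r = i ∧ c' = c) := fun hh => hir hh.1.symm
    simp [hir, hne]

-- The first loop of A: overwrites rows 0 and height-1, columns 0..n-1
theorem pvLoop1_spec (t g0 : List (List Int)) (H W : Nat)
    (hH : 0 < H) (hlen : g0.length = H)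
    (hrow : ∀ r, r < H → (g0.getD r []).length = W) :
    ∀ n, n ≤ W →
      (((List.range n).foldl (fun s c =>
          pvSetCell (pvSetCell s 0 c (pvCell t 0 c)) (H - 1) c (pvCell t (H - 1) c)) g0).length = H) ∧
      (∀ r, (((List.range n).foldl (fun s c =>
          pvSetCell (pvSetCell s 0 c (pvCell t 0 c)) (H - 1) c (pvCell t (H - 1) c)) g0).getD r []).length
          = (g0.getD r []).length) ∧
      (∀ r c, pvCell ((List.range n).foldl (fun s c =>
          pvSetCell (pvSetCell s 0 c (pvCell t 0 c)) (H - 1) c (pvCell t (H - 1) c)) g0) r c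
          = if (r = 0 ∨ r = H - 1) ∧ c < n then pvCell t r c else pvCell g0 r c) := by
  intro n
  induction n with
  | zero => intro _; exact ⟨by simpa using hlen, fun r => by simp, fun r c => by simp⟩
  | succ m ih =>
    intro hm
    obtain ⟨ihL, ihR, ihC⟩ := ih (Nat.le_of_succ_le hm)
    set gm := (List.range m).foldl (fun s c =>
        pvSetCell (pvSetCell s 0 c (pvCell t 0 c)) (H - 1) c (pvCell t (H - 1) c)) g0 with hgm
    have hstep : (List.range (m + 1)).foldl (fun s c =>
        pvSetCell (pvSetCell s 0 c (pvCell t 0 c)) (H - 1) c (pvCell t (H - 1) c)) g0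
        = pvSetCell (pvSetCell gm 0 m (pvCell t 0 m)) (H - 1) m (pvCell t (H - 1) m) := by
      rw [List.range_succ, List.foldl_append]; rfl
    have h0H : 0 < gm.length := by rw [ihL]; exact hH
    have hH1 : H - 1 < gm.length := by rw [ihL]; omega
    have hrow0 : m < (gm.getD 0 []).length := by
      rw [ihR, hrow 0 hH]; omega
    have hrow1' : m < ((pvSetCell gm 0 m (pvCell t 0 m)).getD (H - 1) []).length := by
      rw [pvSetCell_row_length, ihR, hrow (H - 1) (by omega)]; omega
    have h1L : (pvSetCell gm 0 m (pvCell t 0 m)).length = gm.length := pvSetCell_length _ _ _ _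
    refine ⟨?_, ?_, ?_⟩
    · rw [hstep, pvSetCell_length, pvSetCell_length]; exact ihL
    · intro r; rw [hstep, pvSetCell_row_length, pvSetCell_row_length]; exact ihR r
    · intro r c
      rw [hstep,
        pvSetCell_cell _ _ _ _ (by rw [h1L]; exact hH1) hrow1',
        pvSetCell_cell _ _ _ _ h0H hrow0, ihC]
      by_cases h1 : r = H - 1 ∧ c = m
      · rw [if_pos h1]
        obtain ⟨hr, hc⟩ := h1; subst hr; subst hc
        rw [if_pos ⟨Or.inr rfl, Nat.lt_succ_self _⟩]
      · rw [if_neg h1]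
        by_cases h2 : r = 0 ∧ c = m
        · rw [if_pos h2]
          obtain ⟨hr, hc⟩ := h2; subst hr; subst hc
          rw [if_pos ⟨Or.inl rfl, Nat.lt_succ_self _⟩]
        · rw [if_neg h2]
          by_cases h3 : (r = 0 ∨ r = H - 1) ∧ c < m
          · rw [if_pos h3, if_pos ⟨h3.1, Nat.lt_succ_of_lt h3.2⟩]
          · rw [if_neg h3, if_neg]
            rintro ⟨hr, hc⟩
            rcases Nat.lt_succ_iff_lt_or_eq.mp hc with h | h
            · exact h3 ⟨hr, h⟩
            · rcases hr with hr | hr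
              · exact h2 ⟨hr, h⟩
              · exact h1 ⟨hr, h⟩

-- The second loop of A: overwrites columns 0 and width-1 of rows 0..n-1
theorem pvLoop2_spec (t g1 : List (List Int)) (H W : Nat)
    (hW : 0 < W) (hlen : g1.length = H)
    (hrow : ∀ r, r < H → (g1.getD r []).length = W) :
    ∀ n, n ≤ H →
      (((List.range n).foldl (fun s r =>
          pvSetCell (pvSetCell s r 0 (pvCell t r 0)) r (W - 1) (pvCell t r (W - 1))) g1).length = H) ∧
      (∀ r, (((List.range n).foldl (fun s r =>
          pvSetCell (pvSetCell s r 0 (pvCell t r 0)) r (W - 1) (pvCell t r (W - 1))) g1).getD r []).length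
          = (g1.getD r []).length) ∧
      (∀ r c, pvCell ((List.range n).foldl (fun s r =>
          pvSetCell (pvSetCell s r 0 (pvCell t r 0)) r (W - 1) (pvCell t r (W - 1))) g1) r c
          = if r < n ∧ (c = 0 ∨ c = W - 1) then pvCell t r c else pvCell g1 r c) := by
  intro n
  induction n with
  | zero => intro _; exact ⟨by simpa using hlen, fun r => by simp, fun r c => by simp⟩
  | succ m ih =>
    intro hm
    obtain ⟨ihL, ihR, ihC⟩ := ih (Nat.le_of_succ_le hm)
    set gm := (List.range m).foldl (fun s r =>
        pvSetCell (pvSetCell s r 0 (pvCell t r 0)) r (W - 1) (pvCell t r (W - 1))) g1 with hgm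
    have hstep : (List.range (m + 1)).foldl (fun s r =>
        pvSetCell (pvSetCell s r 0 (pvCell t r 0)) r (W - 1) (pvCell t r (W - 1))) g1
        = pvSetCell (pvSetCell gm m 0 (pvCell t m 0)) m (W - 1) (pvCell t m (W - 1)) := by
      rw [List.range_succ, List.foldl_append]; rfl
    have hmH : m < gm.length := by rw [ihL]; omega
    have hc0 : 0 < (gm.getD m []).length := by rw [ihR, hrow m (by omega)]; omega
    have hc1 : W - 1 < ((pvSetCell gm m 0 (pvCell t m 0)).getD m []).length := by
      rw [pvSetCell_row_length, ihR, hrow m (by omega)]; omega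
    have h1L : (pvSetCell gm m 0 (pvCell t m 0)).length = gm.length := pvSetCell_length _ _ _ _
    refine ⟨?_, ?_, ?_⟩
    · rw [hstep, pvSetCell_length, pvSetCell_length]; exact ihL
    · intro r; rw [hstep, pvSetCell_row_length, pvSetCell_row_length]; exact ihR r
    · intro r c
      rw [hstep,
        pvSetCell_cell _ _ _ _ (by rw [h1L]; exact hmH) hc1,
        pvSetCell_cell _ _ _ _ hmH hc0, ihC]
      by_cases h1 : r = m ∧ c = W - 1
      · rw [if_pos h1]
        obtain ⟨hr, hc⟩ := h1; subst hr; subst hc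
        rw [if_pos ⟨Nat.lt_succ_self _, Or.inr rfl⟩]
      · rw [if_neg h1]
        by_cases h2 : r = m ∧ c = 0
        · rw [if_pos h2]
          obtain ⟨hr, hc⟩ := h2; subst hr; subst hc
          rw [if_pos ⟨Nat.lt_succ_self _, Or.inl rfl⟩]
        · rw [if_neg h2]
          by_cases h3 : r < m ∧ (c = 0 ∨ c = W - 1)
          · rw [if_pos h3, if_pos ⟨Nat.lt_succ_of_lt h3.1, h3.2⟩]
          · rw [if_neg h3, if_neg]
            rintro ⟨hr, hc⟩
            rcases Nat.lt_succ_iff_lt_or_eq.mp hr with h | h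
            · exact h3 ⟨h, hc⟩
            · rcases hc with hc | hc
              · exact h2 ⟨h, hc⟩
              · exact h1 ⟨h, hc⟩

-- ===== VERDICT (by name: the statement is the Claim_ definition above) =====
theorem snap_border_like_spec : Claim_equal_snap_border_like := by
  intro train_out pred _
  unfold Spec_snap_border_like snap_border_like snap_border_like_alt
  by_cases hguard : (pvIsRectangularGrid pred && pvIsRectangularGrid train_out) = true
  · rw [if_neg (not_not_intro hguard), if_neg (not_not_intro hguard)]
    obtain ⟨hrp, hrt⟩ := Bool.and_eq_true_iff.mp hguard
    by_cases hdim : train_out.length ≠ pred.length ∨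
        (train_out.getD 0 []).length ≠ (pred.getD 0 []).length
    · rw [if_pos hdim, if_pos hdim]
    · rw [if_neg hdim, if_neg hdim]
      obtain ⟨hHp, hWp, hrows⟩ := pvRect_facts pred hrp
      set H := pred.length with hHdef
      set W := (pred.getD 0 []).length with hWdef
      have hcopy : pvCopyGrid pred = pred := by
        simp [pvCopyGrid, hrp, List.map_id']
      rw [hcopy]
      obtain ⟨h1L, h1R, h1C⟩ :=
        pvLoop1_spec train_out pred H W hHp rfl (fun r hr => hrows r hr) W le_rfl
      set g1 := (List.range W).foldl (fun s c =>
        pvSetCell (pvSetCell s 0 c (pvCell train_out 0 c)) (H - 1) c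
          (pvCell train_out (H - 1) c)) pred with hg1
      obtain ⟨h2L, h2R, h2C⟩ :=
        pvLoop2_spec train_out g1 H W hWp h1L
          (fun r hr => by rw [h1R r]; exact hrows r hr) H le_rfl
      set res := (List.range H).foldl (fun s r =>
        pvSetCell (pvSetCell s r 0 (pvCell train_out r 0)) r (W - 1)
          (pvCell train_out r (W - 1))) g1 with hres
      apply List.ext_getElem?
      intro r
      by_cases hr : r < H
      · have hresr : res[r]? = some (res.getD r []) := by
          rw [List.getElem?_eq_getElem (by rw [h2L]; exact hr)]
          rw [List.getD_eq_getElem _ _ (by rw [h2L]; exact hr)]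
        rw [hresr, List.getElem?_map, List.getElem?_range hr]
        simp only [Option.map_some, Option.some.injEq]
        apply List.ext_getElem?
        intro c
        have hrl : (res.getD r []).length = W := by rw [h2R r, h1R r]; exact hrows r hr
        by_cases hc : c < W
        · rw [List.getElem?_eq_getElem (by rw [hrl]; exact hc),
            List.getElem?_map, List.getElem?_range hc]
          simp only [Option.map_some, Option.some.injEq]
          have hcell : (res.getD r [])[c]'(by rw [hrl]; exact hc) = pvCell res r c :=
            (List.getD_eq_getElem _ _ (by rw [hrl]; exact hc)).symm
          rw [hcell, h2C r c, h1C r c]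
          by_cases hb : r = 0 ∨ r = H - 1 ∨ c = 0 ∨ c = W - 1
          · rw [if_pos hb]
            rcases hb with h | h | h | h
            · by_cases hcb : c = 0 ∨ c = W - 1
              · rw [if_pos ⟨hr, hcb⟩]
              · rw [if_neg (fun hh => hcb hh.2), if_pos ⟨Or.inl h, hc⟩]
            · by_cases hcb : c = 0 ∨ c = W - 1
              · rw [if_pos ⟨hr, hcb⟩]
              · rw [if_neg (fun hh => hcb hh.2), if_pos ⟨Or.inr h, hc⟩]
            · rw [if_pos ⟨hr, Or.inl h⟩]
            · rw [if_pos ⟨hr, Or.inr h⟩]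
          · rw [not_or, not_or, not_or] at hb
            obtain ⟨hb0, hb1, hb2, hb3⟩ := hb
            rw [if_neg (by rintro ⟨_, hcb⟩; rcases hcb with h | h; exact hb2 h; exact hb3 h),
              if_neg (by rintro ⟨hrb, _⟩; rcases hrb with h | h; exact hb0 h; exact hb1 h),
              if_neg (by rintro (h | h | h | h); exact hb0 h; exact hb1 h; exact hb2 h; exact hb3 h)]
        · rw [List.getElem?_eq_none (by rw [hrl]; omega)]
          rw [show ((List.range W).map (fun c =>
              if r = 0 ∨ r = H - 1 ∨ c = 0 ∨ c = W - 1 then pvCell train_out r c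
              else pvCell pred r c))[c]? = none from
            List.getElem?_eq_none (by simpa using by omega)]
      · rw [List.getElem?_eq_none (by rw [h2L]; omega)]
        rw [show ((List.range H).map (fun r => (List.range W).map (fun c =>
            if r = 0 ∨ r = H - 1 ∨ c = 0 ∨ c = W - 1 then pvCell train_out r c
            else pvCell pred r c)))[r]? = none from
          List.getElem?_eq_none (by simpa using by omega)]
  · rw [if_pos hguard, if_pos hguard]
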